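-- pv_equiv track=rewrite | github.com/azabrs/yandex_training | 1 course/3_lesson/alien_dna.py | alien_dna
-- ===== SOURCE A (Python) =====
-- def alien_dna(s1, s2):
--     dna_2_base = set()
--     for i in range(len(s2) - 1):
--         dna_2_base.add(s2[i] + s2[i + 1])
--     count = 0
--     for i in range(len(s1) - 1):
--         if s1[i] + s1[i + 1] in dna_2_base:
--             count += 1
--     return count
-- ===== SOURCE B (Python) =====
-- def alien_dna(s1, s2):
--     # Inverted aggregation: instead of scanning s1 and testing each pair,
--     # iterate once over the DISTINCT adjacent pairs of s2 and add up how many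
--     # times each occurs as an adjacent pair of s1. Every adjacent position of
--     # s1 whose pair appears in s2 is counted exactly once, since the distinct
--     # pairs are disjoint.
--     pairs1 = list(zip(s1, s1[1:]))
--     total = 0
--     for p in set(zip(s2, s2[1:])):
--         total += pairs1.count(p)
--     return total
-- ===== Notes on version B (the rewrite author's own statement) =====
-- stated objective: alternative
-- what changed: Inverts the aggregation: instead of A's scan over s1's positions with a membership test against a precomputed bigram set of s2, B iterates over the distinct adjacent pairs of s2 and sums each pair's multiplicity among s1's adjacent pairs (zip-derived pair lists, no per-position membership loop).
import Mathlib
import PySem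

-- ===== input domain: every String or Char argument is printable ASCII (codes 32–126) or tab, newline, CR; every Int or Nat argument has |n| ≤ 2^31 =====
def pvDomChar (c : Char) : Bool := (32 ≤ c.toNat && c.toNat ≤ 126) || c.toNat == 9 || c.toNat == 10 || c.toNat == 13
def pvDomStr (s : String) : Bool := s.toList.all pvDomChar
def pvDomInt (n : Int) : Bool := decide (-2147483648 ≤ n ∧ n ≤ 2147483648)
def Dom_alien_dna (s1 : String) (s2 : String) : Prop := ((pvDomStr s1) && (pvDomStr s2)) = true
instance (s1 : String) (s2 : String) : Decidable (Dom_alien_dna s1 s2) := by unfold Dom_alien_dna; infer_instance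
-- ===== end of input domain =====

-- B inverts the aggregation: it iterates over the distinct adjacent pairs of s2 and sums
-- each pair's multiplicity among s1's adjacent pairs (alternative decomposition, same result).

-- ===== PORT A =====
-- builds the set of adjacent bigrams of s2, then scans s1's positions counting membership
def alien_dna (s1 : String) (s2 : String) : Int :=
  let l2 := s2.toList
  let base : PySem.Set (List Char) :=
    (List.range (l2.length - 1)).foldl
      (fun st i => PySem.Set.add st [l2[i]!, l2[i + 1]!]) PySem.Set.empty
  let l1 := s1.toList
  (List.range (l1.length - 1)).foldl
    (fun c i => if PySem.Set.contains base [l1[i]!, l1[i + 1]!] then c + 1 else c) 0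

-- ===== PORT B =====
-- for each distinct adjacent pair of s2, add its count among s1's adjacent pairs
def alien_dna_alt (s1 : String) (s2 : String) : Int :=
  let l1 := s1.toList
  let pairs1 := List.zip l1 l1.tail
  let l2 := s2.toList
  (PySem.Set.ofList (List.zip l2 l2.tail)).foldl
    (fun t p => t + (PySem.List.count pairs1 p : Int)) 0

-- ===== PRECONDITION & SPEC =====
def Spec_alien_dna (s1 : String) (s2 : String) (out : Int) : Prop := out = alien_dna_alt s1 s2
instance (s1 : String) (s2 : String) (out : Int) : Decidable (Spec_alien_dna s1 s2 out) := by unfold Spec_alien_dna; infer_instance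

-- ===== CLAIM (what is proved, stated in full; the proofs are below) =====
def Claim_equal_alien_dna : Prop := ∀ (s1 : String) (s2 : String), Dom_alien_dna s1 s2 → Spec_alien_dna s1 s2 (alien_dna s1 s2)

-- ===== LEMMAS AND PROOFS =====

-- the indexed adjacent pairs of l are exactly zip l l.tail
theorem map_range_pairs (l : List Char) :
    (List.range (l.length - 1)).map (fun i => (l[i]!, l[i + 1]!)) = List.zip l l.tail := by
  apply List.ext_getElem
  · simp [List.length_zip]
  · intro i h1 h2
    have hlen : i < l.length - 1 := by simpa using h1
    have hi : i < l.length := by omega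
    have hi1 : i + 1 < l.length := by omega
    simp [List.getElem_zip, List.getElem_tail, List.getElem!_eq_getElem?_getD, hi, hi1]

-- membership in A's bigram set ↔ membership of the pair in zip l2 l2.tail
theorem mem_setA (a b : Char) (l2 : List Char) :
    ([a, b] ∈ (List.range (l2.length - 1)).foldl
        (fun st i => PySem.Set.add st [l2[i]!, l2[i + 1]!]) PySem.Set.empty) ↔
      (a, b) ∈ List.zip l2 l2.tail := by
  rw [PySem.Set.mem_foldl_add, ← map_range_pairs]
  simp [PySem.Set.empty, List.mem_map, Prod.ext_iff, eq_comm, and_comm]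

-- counting membership in p :: rest splits into count of p plus membership in rest (p ∉ rest)
theorem countP_cons_mem (p : Char × Char) (rest xs : List (Char × Char))
    (hpr : p ∉ rest) :
    xs.countP (fun x => decide (x ∈ p :: rest))
      = xs.count p + xs.countP (fun x => decide (x ∈ rest)) := by
  induction xs with
  | nil => simp
  | cons x xs ih =>
    simp only [List.countP_cons, List.count_cons, ih]
    by_cases hxp : x = p
    · subst hxp
      simp [hpr]
      omega
    · by_cases hxr : x ∈ rest
      · simp [hxp, hxr, List.mem_cons]
        omega
      · simp [hxp, hxr, List.mem_cons]

-- summing multiplicities over a duplicate-free list equals counting membership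
theorem sum_count_eq_countP (d xs : List (Char × Char)) (hd : d.Nodup) :
    (d.map (fun p => (PySem.List.count xs p : Int))).sum
      = (xs.countP (fun x => decide (x ∈ d)) : Int) := by
  induction d with
  | nil => simp
  | cons p rest ih =>
    rw [List.map_cons, List.sum_cons, ih (List.nodup_cons.mp hd).2,
      PySem.List.count_eq, countP_cons_mem p rest xs (List.nodup_cons.mp hd).1]
    push_cast
    ring

-- ===== VERDICT (by name: the statement is the Claim_ definition above) =====
theorem alien_dna_spec : Claim_equal_alien_dna := by
  intro s1 s2 _
  unfold Spec_alien_dna alien_dna alien_dna_alt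
  simp only
  set l1 := s1.toList with hl1
  set l2 := s2.toList with hl2
  set base := (List.range (l2.length - 1)).foldl
      (fun st i => PySem.Set.add st [l2[i]!, l2[i + 1]!]) PySem.Set.empty with hbase
  set pairs1 := List.zip l1 l1.tail with hp1
  set pairs2 := List.zip l2 l2.tail with hp2
  -- A side: fold over indices = fold over pairs1, condition = pair ∈ pairs2
  have h1 : (List.range (l1.length - 1)).foldl
      (fun c i => if PySem.Set.contains base [l1[i]!, l1[i + 1]!] then c + 1 else c) 0
      = pairs1.foldl
          (fun (c : Int) p => if PySem.Set.contains base [p.1, p.2] then c + 1 else c) 0 := by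
    rw [hp1, ← map_range_pairs l1, List.foldl_map]
  have h2 : pairs1.foldl
        (fun (c : Int) p => if PySem.Set.contains base [p.1, p.2] then c + 1 else c) 0
      = pairs1.foldl (fun (c : Int) p => if p ∈ pairs2 then c + 1 else c) 0 := by
    congr 1
    funext c p
    by_cases h : p ∈ pairs2
    · rw [if_pos ((PySem.Set.contains_iff _ _).mpr ((mem_setA p.1 p.2 l2).mpr h)), if_pos h]
    · rw [if_neg (fun hc => h ((mem_setA p.1 p.2 l2).mp ((PySem.Set.contains_iff _ _).mp hc))),
        if_neg h]
  have h3 : pairs1.foldl (fun (c : Int) p => if p ∈ pairs2 then c + 1 else c) 0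
      = (pairs1.countP (fun p => decide (p ∈ pairs2)) : Int) := by
    rw [PySem.List.foldl_ite_add_one (fun p => p ∈ pairs2) pairs1 0]
    simp
  -- B side: sum of counts over the distinct pairs of s2
  have h4 : (PySem.Set.ofList pairs2).foldl
        (fun t p => t + (PySem.List.count pairs1 p : Int)) 0
      = (pairs1.countP (fun p => decide (p ∈ pairs2)) : Int) := by
    rw [PySem.List.foldl_add (PySem.Set.ofList pairs2)
        (fun p => (PySem.List.count pairs1 p : Int)) 0]
    rw [sum_count_eq_countP (PySem.Set.ofList pairs2) pairs1 (PySem.Set.nodup_ofList pairs2)]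
    have hc : pairs1.countP (fun x => decide (x ∈ PySem.Set.ofList pairs2))
        = pairs1.countP (fun p => decide (p ∈ pairs2)) := by
      apply List.countP_congr
      intro x _
      simp [PySem.Set.mem_ofList]
    rw [hc]
    simp
  exact h1.trans (h2.trans (h3.trans h4.symm))
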